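-- pv_equiv track=rewrite | github.com/varun1729/Project-Euler | 79.py | getDigitsGen
-- ===== SOURCE A (Python) =====
-- def reverseNum (num):
-- 	reverse = 0
-- 	while (num >0):
-- 		reverse = reverse*10 + num%10
-- 		num //= 10
-- 	return reverse
--
-- def getDigitsGen (num):
-- 	num = reverseNum(num)
-- 	digits = []
-- 	while(len(digits) < 3):
-- 		digits.append(num%10)
-- 		num //= 10
-- 	for digit in digits:
-- 		yield digit
-- ===== SOURCE B (Python) =====
-- def getDigitsGen(num):
--     s = "0" if num <= 0 else str(num)
--     for ch in (s + "000")[:3]: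
--         yield int(ch)
-- ===== Notes on version B (the rewrite author's own statement) =====
-- stated objective: idiomatic
-- what changed: Replaced the arithmetic digit-reversal loop plus low-order digit extraction by reading the leading three characters of the decimal string str(num), padded with '000'.
import Mathlib
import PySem

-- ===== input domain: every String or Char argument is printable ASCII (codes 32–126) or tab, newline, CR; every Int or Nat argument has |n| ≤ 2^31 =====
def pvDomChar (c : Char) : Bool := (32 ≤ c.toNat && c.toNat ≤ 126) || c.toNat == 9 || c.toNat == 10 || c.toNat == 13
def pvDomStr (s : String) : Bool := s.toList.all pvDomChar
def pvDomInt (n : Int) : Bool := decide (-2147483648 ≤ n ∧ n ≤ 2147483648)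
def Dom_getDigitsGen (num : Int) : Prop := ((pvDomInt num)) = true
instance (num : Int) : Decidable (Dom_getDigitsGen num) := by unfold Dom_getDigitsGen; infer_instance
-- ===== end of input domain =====

-- B reads the leading three digits from the padded decimal string of num instead of
-- arithmetically reversing the number and extracting its low-order digits (idiomatic rewrite,
-- same cost); return-value equivalence only (both Pythons are generators, compared as lists).


-- ===== PORT A =====
-- 'while num > 0: reverse = reverse*10 + num%10; num //= 10'
def reverseNumLoop (num reverse : Int) : Int :=
  if 0 < num then
    reverseNumLoop (PySem.Int.floordiv num 10) (reverse * 10 + PySem.Int.mod num 10)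
  else reverse
termination_by num.toNat
decreasing_by
  have h10 : (0:Int) < 10 := by omega
  rw [PySem.Int.floordiv_eq_ediv_of_pos h10]
  omega

def reverseNum (num : Int) : Int := reverseNumLoop num 0

-- 'while len(digits) < 3: digits.append(num%10); num //= 10'
def digitsLoop (num : Int) (digits : List Int) : List Int :=
  if digits.length < 3 then
    digitsLoop (PySem.Int.floordiv num 10) (digits ++ [PySem.Int.mod num 10])
  else digits
termination_by 3 - digits.length

def getDigitsGen (num : Int) : List Int :=
  digitsLoop (reverseNum num) []

-- ===== PORT B =====
-- s = "0" if num <= 0 else str(num); yield int(ch) for ch in (s + "000")[:3]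
-- (the string is carried as its character list; int(ch) is PySem.Int.ofChars? on the
--  single character, exact since every character sliced here is a decimal digit)
def getDigitsGen_alt (num : Int) : List Int :=
  let s : List Char := if num ≤ 0 then ['0'] else (PySem.Int.toStr num).toList
  (PySem.List.slice (s ++ ['0', '0', '0']) none (some 3)).map
    (fun c => (PySem.Int.ofChars? [c]).getD 0)

-- ===== PRECONDITION & SPEC =====
def Spec_getDigitsGen (num : Int) (out : List Int) : Prop := out = getDigitsGen_alt num
instance (num : Int) (out : List Int) : Decidable (Spec_getDigitsGen num out) := by unfold Spec_getDigitsGen; infer_instance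

-- ===== CLAIM (what is proved, stated in full; the proofs are below) =====
def Claim_equal_getDigitsGen : Prop := ∀ (num : Int), Dom_getDigitsGen num → Spec_getDigitsGen num (getDigitsGen num)

-- ===== LEMMAS AND PROOFS =====

-- A's reversal loop computes the value of the reversed (big-endian) digit list
lemma reverseNumLoop_nat (m : Nat) (r : Int) :
    reverseNumLoop (m : Int) r
      = r * 10 ^ (Nat.digits 10 m).length
          + ((Nat.ofDigits 10 (Nat.digits 10 m).reverse : Nat) : Int) := by
  induction m using Nat.strong_induction_on generalizing r with
  | _ m ih =>
    rw [reverseNumLoop]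
    by_cases hm : 0 < m
    · have hcast : (0:Int) < (m:Int) := by exact_mod_cast hm
      rw [if_pos hcast]
      have hd : PySem.Int.floordiv (m : Int) 10 = ((m / 10 : Nat) : Int) := by
        exact_mod_cast PySem.Int.floordiv_natCast m 10
      have hmo : PySem.Int.mod (m : Int) 10 = ((m % 10 : Nat) : Int) := by
        exact_mod_cast PySem.Int.mod_natCast m 10
      rw [hd, hmo, ih (m / 10) (by omega)]
      have hdig : Nat.digits 10 m = m % 10 :: Nat.digits 10 (m / 10) :=
        Nat.digits_def' (by omega) hm
      rw [hdig]
      simp only [List.reverse_cons, List.length_cons]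
      rw [Nat.ofDigits_append, Nat.ofDigits_singleton]
      simp only [List.length_reverse]
      push_cast
      ring
    · rw [if_neg (by exact_mod_cast hm)]
      have : m = 0 := by omega
      subst this
      simp

-- A's three-iteration extraction loop, on a nonnegative number
lemma digitsLoop_nat (n : Nat) :
    digitsLoop (n : Int) []
      = [((n % 10 : Nat) : Int), ((n / 10 % 10 : Nat) : Int), ((n / 10 / 10 % 10 : Nat) : Int)] := by
  have hd : ∀ k : Nat, PySem.Int.floordiv (k : Int) 10 = ((k / 10 : Nat) : Int) := fun k => by
    exact_mod_cast PySem.Int.floordiv_natCast k 10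
  have hm : ∀ k : Nat, PySem.Int.mod (k : Int) 10 = ((k % 10 : Nat) : Int) := fun k => by
    exact_mod_cast PySem.Int.mod_natCast k 10
  rw [digitsLoop, if_pos (by simp), hd, hm,
      digitsLoop, if_pos (by simp), hd, hm,
      digitsLoop, if_pos (by simp), hd, hm,
      digitsLoop, if_neg (by simp)]
  simp

-- the extraction loop on the value of a digit list reads off its first three entries
lemma digitsLoop_ofDigits (L : List Nat) (hL : ∀ d ∈ L, d < 10) :
    digitsLoop ((Nat.ofDigits 10 L : Nat) : Int) []
      = [(L.getD 0 0 : Int), (L.getD 1 0 : Int), (L.getD 2 0 : Int)] := by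
  rw [digitsLoop_nat]
  rcases L with _ | ⟨a, _ | ⟨b, _ | ⟨c, t⟩⟩⟩
  · simp [Nat.ofDigits]
  · have ha : a < 10 := hL a (by simp)
    simp only [Nat.ofDigits_cons, Nat.ofDigits_nil, List.getD]
    norm_num
    omega
  · have ha : a < 10 := hL a (by simp)
    have hb : b < 10 := hL b (by simp)
    simp only [Nat.ofDigits_cons, Nat.ofDigits_nil, List.getD]
    norm_num
    refine ⟨by omega, by omega, by omega⟩
  · have ha : a < 10 := hL a (by simp)
    have hb : b < 10 := hL b (by simp)
    have hc : c < 10 := hL c (by simp)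
    simp only [Nat.ofDigits_cons, List.getD]
    norm_num
    refine ⟨by omega, by omega, by omega⟩

-- core's printing routine produces the big-endian digit characters
lemma toDigitsCore_eq (fuel : Nat) : ∀ (n : Nat) (ds : List Char), n ≠ 0 → n ≤ fuel →
    Nat.toDigitsCore 10 fuel n ds = (Nat.digits 10 n).reverse.map Nat.digitChar ++ ds := by
  induction fuel with
  | zero => intro n ds hn hf; omega
  | succ fuel ih =>
    intro n ds hn hf
    rw [Nat.toDigitsCore]
    have hdig : Nat.digits 10 n = n % 10 :: Nat.digits 10 (n / 10) :=
      Nat.digits_def' (by omega) (by omega)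
    by_cases h0 : n / 10 = 0
    · rw [if_pos h0, hdig, h0]
      simp
    · rw [if_neg h0, ih (n / 10) _ h0 (by omega), hdig]
      simp

lemma toDigits_eq (m : Nat) (hm : 0 < m) :
    Nat.toDigits 10 m = ((Nat.digits 10 m).reverse).map Nat.digitChar := by
  rw [Nat.toDigits, toDigitsCore_eq (m + 1) m [] (by omega) (by omega)]
  simp

-- int(ch) on a digit character
lemma ofChars_digitChar (d : Nat) (hd : d < 10) :
    (PySem.Int.ofChars? [Nat.digitChar d]).getD 0 = (d : Int) := by
  interval_cases d <;> decide

lemma ofChars_zeroChar : (PySem.Int.ofChars? ['0']).getD 0 = 0 := by decide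

-- B's padded three-character slice, mapped back to numbers
lemma take3_map (L : List Nat) (hL : ∀ d ∈ L, d < 10) :
    ((L.map Nat.digitChar ++ ['0', '0', '0']).take 3).map
        (fun c => (PySem.Int.ofChars? [c]).getD 0)
      = [(L.getD 0 0 : Int), (L.getD 1 0 : Int), (L.getD 2 0 : Int)] := by
  rcases L with _ | ⟨a, _ | ⟨b, _ | ⟨c, t⟩⟩⟩
  · decide
  · have ha := ofChars_digitChar a (hL a (by simp))
    simp [List.getD, ha, ofChars_zeroChar]
  · have ha := ofChars_digitChar a (hL a (by simp))
    have hb := ofChars_digitChar b (hL b (by simp))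
    simp [List.getD, ha, hb, ofChars_zeroChar]
  · have ha := ofChars_digitChar a (hL a (by simp))
    have hb := ofChars_digitChar b (hL b (by simp))
    have hc := ofChars_digitChar c (hL c (by simp))
    simp [List.getD, ha, hb, hc]

-- ===== VERDICT (by name: the statement is the Claim_ definition above) =====
theorem getDigitsGen_spec : Claim_equal_getDigitsGen := by
  intro num _
  unfold Spec_getDigitsGen getDigitsGen getDigitsGen_alt reverseNum
  by_cases hpos : 0 < num
  · have hm : ((num.toNat : Nat) : Int) = num := Int.toNat_of_nonneg (le_of_lt hpos)
    set m : Nat := num.toNat with hmdef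
    have hm0 : 0 < m := by omega
    have hL : ∀ d ∈ (Nat.digits 10 m).reverse, d < 10 := by
      intro d hd
      exact Nat.digits_lt_base (by omega) (List.mem_reverse.mp hd)
    -- A side
    rw [← hm, reverseNumLoop_nat m 0]
    simp only [zero_mul, zero_add]
    rw [digitsLoop_ofDigits _ hL]
    -- B side
    rw [if_neg (by omega), PySem.Int.toList_toStr, PySem.Int.toChars, if_neg (by omega)]
    simp only [Int.toNat_natCast]
    rw [toDigits_eq m hm0, show (3 : Int) = ((3 : Nat) : Int) from rfl,
        PySem.List.slice_to_natCast]
    rw [take3_map _ hL]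
  · -- num ≤ 0 : A reverses to 0 and extracts [0,0,0]; B formats "0" and pads
    have hA : reverseNumLoop num 0 = 0 := by
      rw [reverseNumLoop, if_neg hpos]
    have hB : (if num ≤ 0 then ['0'] else (PySem.Int.toStr num).toList) = ['0'] :=
      if_pos (by omega)
    have h0 : digitsLoop ((0 : Nat) : Int) [] = [0, 0, 0] := by
      rw [digitsLoop_nat]; decide
    norm_num at h0
    simp only [hA, hB, h0]
    decide
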